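-- pv_equiv track=rewrite | github.com/ark2016/VK-Technopark-project-2024 | data_mining/tests/functions/file_201_220.py | find_product_of_two_primes_not_divisible_by_11
-- ===== SOURCE A (Python) =====
-- def find_product_of_two_primes_not_divisible_by_11(lst):
--     def is_prime(n):
--         if n < 2:
--             return False
--         for i in range(2, int(n ** 0.5) + 1):
--             if n % i == 0:
--                 return False
--         return True
--
--     result = []
--     for num in lst:
--         for i in range(1, num // 2 + 1):
--             if num % i == 0 and is_prime(i) and is_prime(num // i) and num % 11 != 0:
--                 result.append(num)
--                 break
--     if not result:
--         return None
--     return result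
-- ===== SOURCE B (Python) =====
-- def find_product_of_two_primes_not_divisible_by_11(lst):
--     def smallest_factor(n):
--         # smallest d >= 2 with d*d <= n and d | n, else n itself
--         d = 2
--         while d * d <= n:
--             if n % d == 0:
--                 return d
--             d += 1
--         return n
--
--     result = []
--     for num in lst:
--         if num >= 4 and num % 11 != 0:
--             p = smallest_factor(num)
--             q = num // p
--             if q > 1 and smallest_factor(q) == q:
--                 result.append(num)
--     return result if result else None
-- ===== Notes on version B (the rewrite author's own statement) =====
-- stated objective: faster
-- what changed: A scans every i up to num//2 testing each divisor pair with a sqrt primality check; B trial-divides only up to sqrt(num) for the smallest factor and then primality-tests the cofactor the same way, recognising a semiprime not divisible by 11 directly.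
import Mathlib
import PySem

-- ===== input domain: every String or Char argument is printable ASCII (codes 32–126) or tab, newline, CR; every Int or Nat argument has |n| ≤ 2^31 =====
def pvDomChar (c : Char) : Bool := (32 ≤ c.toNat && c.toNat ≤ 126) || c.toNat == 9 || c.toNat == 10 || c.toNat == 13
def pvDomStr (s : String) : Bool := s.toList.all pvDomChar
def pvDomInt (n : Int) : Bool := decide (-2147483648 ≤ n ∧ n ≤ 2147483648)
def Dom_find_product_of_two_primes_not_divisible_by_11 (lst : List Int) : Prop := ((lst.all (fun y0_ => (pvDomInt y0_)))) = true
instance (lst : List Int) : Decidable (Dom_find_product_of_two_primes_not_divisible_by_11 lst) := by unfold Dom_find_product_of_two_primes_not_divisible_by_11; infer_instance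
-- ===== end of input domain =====

-- B replaces A's scan of every i up to num//2 (each with a sqrt primality test) by one trial
-- division up to sqrt(num) for the smallest factor plus a primality test of the cofactor.

-- ===== PORT A =====
-- helper is_prime of A; int(n ** 0.5) equals Nat.sqrt n.toNat exactly for the 0 ≤ n ≤ 2^31
-- values this helper receives (floats are exact there); the loop with early return is `.all`
def isPrimeA (n : Int) : Bool :=
  if n < 2 then false
  else (PySem.List.pyRange 2 ((Nat.sqrt n.toNat : Int) + 1) 1).all
        (fun i => !(PySem.Int.mod n i == 0))

-- A's inner `for i in range(1, num//2+1): … break` appends num iff some i satisfies the test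
def innerA (num : Int) : Bool :=
  (PySem.List.pyRange 1 (PySem.Int.floordiv num 2 + 1) 1).any
    (fun i => PySem.Int.mod num i == 0 && isPrimeA i && isPrimeA (PySem.Int.floordiv num i)
              && !(PySem.Int.mod num 11 == 0))

def find_product_of_two_primes_not_divisible_by_11 (lst : List Int) : Option (List Int) :=
  let result := lst.foldl (fun result num => if innerA num then result ++ [num] else result) []
  if result = [] then none else some result

-- ===== PORT B =====
-- B's `while d*d <= n` loop; the loop variable d is the recursion argument
def smallestFactor (n : Int) (d : Int) : Int :=
  if h : d * d ≤ n then
    if PySem.Int.mod n d == 0 then d else smallestFactor n (d + 1)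
  else n
termination_by (n + 1 - d).toNat
decreasing_by
  have hdn : d ≤ n := by nlinarith [mul_self_nonneg d, mul_self_nonneg (d - 1)]
  omega

-- B's per-element test: num >= 4 and num % 11 != 0, then the cofactor of the smallest factor
def innerB (num : Int) : Bool :=
  if 4 ≤ num ∧ PySem.Int.mod num 11 ≠ 0 then
    let p := smallestFactor num 2
    let q := PySem.Int.floordiv num p
    decide (1 < q) && (smallestFactor q 2 == q)
  else false

def find_product_of_two_primes_not_divisible_by_11_alt (lst : List Int) : Option (List Int) :=
  let result := lst.foldl (fun result num => if innerB num then result ++ [num] else result) []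
  if result = [] then none else some result

-- ===== PRECONDITION & SPEC =====
def Spec_find_product_of_two_primes_not_divisible_by_11 (lst : List Int) (out : Option (List Int)) : Prop := out = find_product_of_two_primes_not_divisible_by_11_alt lst
instance (lst : List Int) (out : Option (List Int)) : Decidable (Spec_find_product_of_two_primes_not_divisible_by_11 lst out) := by unfold Spec_find_product_of_two_primes_not_divisible_by_11; infer_instance

-- ===== CLAIM (what is proved, stated in full; the proofs are below) =====
def Claim_equal_find_product_of_two_primes_not_divisible_by_11 : Prop := ∀ (lst : List Int), Dom_find_product_of_two_primes_not_divisible_by_11 lst → Spec_find_product_of_two_primes_not_divisible_by_11 lst (find_product_of_two_primes_not_divisible_by_11 lst)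

-- ===== LEMMAS AND PROOFS =====

-- the common characterisation: num is a product of two (positive) primes and 11 does not divide it
def SPCond (n : Int) : Prop :=
  (∃ a b : Int, Prime a ∧ Prime b ∧ 0 < a ∧ 0 < b ∧ n = a * b) ∧ ¬ ((11 : Int) ∣ n)

lemma int_prime_toNat {n : Int} (h : 0 < n) : Prime n ↔ Nat.Prime n.toNat := by
  rw [Int.prime_iff_natAbs_prime, Int.natAbs_eq_iff.mpr (Or.inl (Int.toNat_of_nonneg h.le).symm)]

lemma two_le_of_prime {p : Int} (hp : Prime p) (h0 : 0 < p) : 2 ≤ p := by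
  rcases (int_prime_toNat h0).mp hp with hnp
  have := hnp.two_le
  omega

lemma prime_iff_no_small_div (n : Int) (h2 : 2 ≤ n) :
    Prime n ↔ ∀ k : Int, 2 ≤ k → k * k ≤ n → ¬ k ∣ n := by
  have hn0 : 0 < n := by omega
  constructor
  · intro hp k hk hkk hdvd
    have hkn : k.toNat ∣ n.toNat := by
      rw [← Int.natCast_dvd_natCast, Int.toNat_of_nonneg (by omega), Int.toNat_of_nonneg hn0.le]
      exact hdvd
    rcases ((int_prime_toNat hn0).mp hp).eq_one_or_self_of_dvd _ hkn with h1 | h1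
    · omega
    · have hk' : k = n := by omega
      subst hk'
      nlinarith
  · intro H
    rw [int_prime_toNat hn0, Nat.prime_def_le_sqrt]
    refine ⟨by omega, fun m hm hms hdvd => ?_⟩
    have hmm : m * m ≤ n.toNat := Nat.le_sqrt.mp hms
    refine H m (by omega) ?_ ?_
    · have := (Int.ofNat_le.mpr hmm)
      push_cast at this
      omega
    · rw [show n = ((n.toNat : Int)) by omega]
      exact_mod_cast hdvd

-- is_prime of A decides primality
lemma isPrimeA_iff (n : Int) : isPrimeA n = true ↔ 2 ≤ n ∧ Prime n := by
  unfold isPrimeA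
  by_cases h : n < 2
  · simp [h]
  · have h2 : 2 ≤ n := by omega
    simp only [h, if_false, List.all_eq_true]
    rw [prime_iff_no_small_div n h2]
    constructor
    · intro H
      refine ⟨h2, fun k hk hkk hdvd => ?_⟩
      have hmem : k ∈ PySem.List.pyRange 2 ((Nat.sqrt n.toNat : Int) + 1) 1 := by
        rw [PySem.List.mem_pyRange_one]
        refine ⟨hk, ?_⟩
        have : k.toNat ≤ Nat.sqrt n.toNat := by
          rw [Nat.le_sqrt]
          have : (k.toNat : Int) * k.toNat ≤ (n.toNat : Int) := by
            rw [Int.toNat_of_nonneg (by omega), Int.toNat_of_nonneg (by omega)]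
            exact hkk
          exact_mod_cast this
        omega
      have := H k hmem
      simp only [Bool.not_eq_eq_eq_not, Bool.not_true, beq_eq_false_iff_ne] at this
      exact this ((PySem.Int.mod_eq_zero_iff_dvd n k).mpr hdvd)
    · intro ⟨_, H⟩ k hmem
      rw [PySem.List.mem_pyRange_one] at hmem
      obtain ⟨hk2, hklt⟩ := hmem
      have hkk : k * k ≤ n := by
        have hks : k.toNat ≤ Nat.sqrt n.toNat := by omega
        have := Nat.le_sqrt.mp hks
        have h' : (k.toNat : Int) * k.toNat ≤ (n.toNat : Int) := by exact_mod_cast this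
        rw [Int.toNat_of_nonneg (by omega), Int.toNat_of_nonneg (by omega)] at h'
        exact h'
      have := H k hk2 hkk
      simp only [Bool.not_eq_eq_eq_not, Bool.not_true, beq_eq_false_iff_ne]
      intro hmod
      exact this ((PySem.Int.mod_eq_zero_iff_dvd n k).mp hmod)

-- the while-loop of B: either no tested d divides n (result n), or the result is the least such d
lemma spf_spec (n d : Int) (hd : 2 ≤ d) :
    (smallestFactor n d = n ∧ ∀ k, d ≤ k → k * k ≤ n → PySem.Int.mod n k ≠ 0)
    ∨ (∃ k, smallestFactor n d = k ∧ d ≤ k ∧ k * k ≤ n ∧ PySem.Int.mod n k = 0 ∧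
        ∀ j, d ≤ j → j < k → PySem.Int.mod n j ≠ 0) := by
  revert hd
  induction d using smallestFactor.induct n with
  | case1 d h hmod =>
    intro hd
    right
    refine ⟨d, ?_, le_refl d, h, by simpa using hmod, fun j hj hjk => by omega⟩
    rw [smallestFactor]
    simp [h, hmod]
  | case2 d h hmod ih =>
    intro hd
    have heq : smallestFactor n d = smallestFactor n (d + 1) := by
      rw [smallestFactor]; simp [h, hmod]
    have hmod' : PySem.Int.mod n d ≠ 0 := by simpa using hmod
    rcases ih (by omega) with ⟨hres, H⟩ | ⟨k, hres, hk, hkk, hkm, hmin⟩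
    · left
      refine ⟨heq ▸ hres, fun k hk hkk => ?_⟩
      rcases eq_or_lt_of_le hk with rfl | hlt
      · exact hmod'
      · exact H k (by omega) hkk
    · right
      refine ⟨k, heq ▸ hres, by omega, hkk, hkm, fun j hj hjk => ?_⟩
      rcases eq_or_lt_of_le hj with rfl | hlt
      · exact hmod'
      · exact hmin j (by omega) hjk
  | case3 d h =>
    intro hd
    left
    refine ⟨by rw [smallestFactor]; simp [h], fun k hk hkk => ?_⟩
    exfalso
    have : d * d ≤ k * k := by nlinarith
    omega

-- primality test of B: smallest_factor(n) == n decides primality for n ≥ 2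
lemma spf_self_iff (n : Int) (h2 : 2 ≤ n) : smallestFactor n 2 = n ↔ Prime n := by
  rcases spf_spec n 2 (le_refl 2) with ⟨hres, H⟩ | ⟨k, hres, hk, hkk, hkm, _⟩
  · rw [hres]
    simp only [true_iff]
    rw [prime_iff_no_small_div n h2]
    intro k hk hkk hdvd
    exact H k hk hkk ((PySem.Int.mod_eq_zero_iff_dvd n k).mpr hdvd)
  · rw [hres]
    have hdvd : k ∣ n := (PySem.Int.mod_eq_zero_iff_dvd n k).mp hkm
    constructor
    · intro hkn
      subst hkn
      nlinarith
    · intro hp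
      exact absurd hdvd ((prime_iff_no_small_div n h2).mp hp k hk hkk)

-- a least tested divisor is prime
lemma spf_factor_prime (n k : Int) (_h2 : 2 ≤ n) (hk : 2 ≤ k) (_hkk : k * k ≤ n)
    (hdvd : k ∣ n) (hmin : ∀ j, 2 ≤ j → j < k → PySem.Int.mod n j ≠ 0) : Prime k := by
  rw [prime_iff_no_small_div k hk]
  intro j hj hjj hjk
  have hjlt : j < k := by nlinarith
  exact hmin j hj hjlt ((PySem.Int.mod_eq_zero_iff_dvd n j).mpr (hjk.trans hdvd))

lemma innerA_iff (num : Int) : innerA num = true ↔ SPCond num := by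
  unfold innerA
  rw [List.any_eq_true]
  constructor
  · rintro ⟨i, hmem, hcond⟩
    simp only [Bool.and_eq_true, beq_iff_eq, Bool.not_eq_eq_eq_not, Bool.not_true,
      beq_eq_false_iff_ne] at hcond
    obtain ⟨⟨⟨hmod, hpi⟩, hpq⟩, h11⟩ := hcond
    rw [isPrimeA_iff] at hpi hpq
    obtain ⟨hi2, hip⟩ := hpi
    obtain ⟨hq2, hqp⟩ := hpq
    have hdvd : i ∣ num := (PySem.Int.mod_eq_zero_iff_dvd num i).mp hmod
    rw [PySem.Int.floordiv_eq_ediv_of_pos (by omega)] at hq2 hqp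
    refine ⟨⟨i, num / i, hip, hqp, by omega, by omega, (Int.ediv_mul_cancel hdvd).symm.trans (mul_comm _ _)⟩, ?_⟩
    intro hd
    exact h11 ((PySem.Int.mod_eq_zero_iff_dvd num 11).mpr hd)
  · rintro ⟨⟨a, b, hpa, hpb, ha0, hb0, hn⟩, h11⟩
    have ha2 := two_le_of_prime hpa ha0
    have hb2 := two_le_of_prime hpb hb0
    -- use the smaller prime as the witness index
    rcases le_total a b with hab | hab
    · refine ⟨a, ?_, ?_⟩
      · rw [PySem.List.mem_pyRange_one]
        refine ⟨by omega, ?_⟩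
        rw [show PySem.Int.floordiv num 2 + 1 = num / 2 + 1 from by
          rw [PySem.Int.floordiv_eq_ediv_of_pos]; omega]
        have : a ≤ num / 2 := by
          rw [Int.le_ediv_iff_mul_le (by omega)]
          nlinarith
        omega
      · simp only [Bool.and_eq_true, beq_iff_eq, Bool.not_eq_eq_eq_not, Bool.not_true,
          beq_eq_false_iff_ne]
        have hdvd : a ∣ num := ⟨b, hn⟩
        refine ⟨⟨⟨(PySem.Int.mod_eq_zero_iff_dvd num a).mpr hdvd, ?_⟩, ?_⟩, ?_⟩
        · rw [isPrimeA_iff]; exact ⟨ha2, hpa⟩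
        · rw [PySem.Int.floordiv_eq_ediv_of_pos (by omega), hn,
            Int.mul_ediv_cancel_left b (by omega), isPrimeA_iff]
          exact ⟨hb2, hpb⟩
        · intro hmod
          exact h11 ((PySem.Int.mod_eq_zero_iff_dvd num 11).mp hmod)
    · refine ⟨b, ?_, ?_⟩
      · rw [PySem.List.mem_pyRange_one]
        refine ⟨by omega, ?_⟩
        rw [show PySem.Int.floordiv num 2 + 1 = num / 2 + 1 from by
          rw [PySem.Int.floordiv_eq_ediv_of_pos]; omega]
        have : b ≤ num / 2 := by
          rw [Int.le_ediv_iff_mul_le (by omega)]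
          nlinarith
        omega
      · simp only [Bool.and_eq_true, beq_iff_eq, Bool.not_eq_eq_eq_not, Bool.not_true,
          beq_eq_false_iff_ne]
        have hdvd : b ∣ num := ⟨a, by rw [hn, mul_comm]⟩
        refine ⟨⟨⟨(PySem.Int.mod_eq_zero_iff_dvd num b).mpr hdvd, ?_⟩, ?_⟩, ?_⟩
        · rw [isPrimeA_iff]; exact ⟨hb2, hpb⟩
        · rw [PySem.Int.floordiv_eq_ediv_of_pos (by omega), hn, mul_comm a b,
            Int.mul_ediv_cancel_left a (by omega), isPrimeA_iff]
          exact ⟨ha2, hpa⟩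
        · intro hmod
          exact h11 ((PySem.Int.mod_eq_zero_iff_dvd num 11).mp hmod)

lemma prime_dvd_prime_eq {p a : Int} (hp : Prime p) (ha : Prime a) (hp0 : 0 < p)
    (ha0 : 0 < a) (h : p ∣ a) : p = a := by
  have h2p := two_le_of_prime hp hp0
  have hn : p.toNat ∣ a.toNat := by
    rw [← Int.natCast_dvd_natCast, Int.toNat_of_nonneg hp0.le, Int.toNat_of_nonneg ha0.le]
    exact h
  rcases ((int_prime_toNat ha0).mp ha).eq_one_or_self_of_dvd _ hn with h1 | h1 <;> omega

lemma innerB_iff (num : Int) : innerB num = true ↔ SPCond num := by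
  unfold innerB
  by_cases hc : 4 ≤ num ∧ PySem.Int.mod num 11 ≠ 0
  · rw [if_pos hc]
    obtain ⟨h4, h11⟩ := hc
    have h11' : ¬ (11 : Int) ∣ num := fun hd => h11 ((PySem.Int.mod_eq_zero_iff_dvd num 11).mpr hd)
    simp only [Bool.and_eq_true, decide_eq_true_eq, beq_iff_eq]
    constructor
    · rintro ⟨hq1, hqspf⟩
      rcases spf_spec num 2 (by norm_num) with ⟨hres, H⟩ | ⟨k, hres, hk, hkk, hkm, hmin⟩
      · exfalso
        rw [hres, PySem.Int.floordiv_eq_ediv_of_pos (by omega),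
          Int.ediv_self (by omega : num ≠ 0)] at hq1
        omega
      · rw [hres] at hq1 hqspf
        have hdvd : k ∣ num := (PySem.Int.mod_eq_zero_iff_dvd num k).mp hkm
        have hkp : Prime k := spf_factor_prime num k (by omega) hk hkk hdvd hmin
        have hq : PySem.Int.floordiv num k = num / k :=
          PySem.Int.floordiv_eq_ediv_of_pos (by omega)
        rw [hq] at hq1 hqspf
        have hmul : num = k * (num / k) := by
          rw [mul_comm]; exact (Int.ediv_mul_cancel hdvd).symm
        have hqp : Prime (num / k) := (spf_self_iff _ (by omega)).mp hqspf
        exact ⟨⟨k, num / k, hkp, hqp, by omega, by omega, hmul⟩, h11'⟩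
    · rintro ⟨⟨a, b, hpa, hpb, ha0, hb0, hn⟩, _⟩
      have ha2 := two_le_of_prime hpa ha0
      have hb2 := two_le_of_prime hpb hb0
      rcases spf_spec num 2 (by norm_num) with ⟨hres, H⟩ | ⟨k, hres, hk, hkk, hkm, hmin⟩
      · exfalso
        rcases le_total a b with hab | hab
        · exact H a ha2 (by nlinarith) ((PySem.Int.mod_eq_zero_iff_dvd num a).mpr ⟨b, hn⟩)
        · exact H b hb2 (by nlinarith)
            ((PySem.Int.mod_eq_zero_iff_dvd num b).mpr ⟨a, by rw [hn, mul_comm]⟩)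
      · have hdvd : k ∣ num := (PySem.Int.mod_eq_zero_iff_dvd num k).mp hkm
        have hkp : Prime k := spf_factor_prime num k (by omega) hk hkk hdvd hmin
        rw [hres]
        have hkab : k = a ∨ k = b := by
          rcases hkp.2.2 a b (hn ▸ hdvd) with h | h
          · exact Or.inl (prime_dvd_prime_eq hkp hpa (by omega) ha0 h)
          · exact Or.inr (prime_dvd_prime_eq hkp hpb (by omega) hb0 h)
        rcases hkab with rfl | rfl
        · rw [PySem.Int.floordiv_eq_ediv_of_pos (by omega), hn,
            Int.mul_ediv_cancel_left b (by omega)]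
          exact ⟨by omega, (spf_self_iff b hb2).mpr hpb⟩
        · rw [PySem.Int.floordiv_eq_ediv_of_pos (by omega), hn, mul_comm a k,
            Int.mul_ediv_cancel_left a (by omega)]
          exact ⟨by omega, (spf_self_iff a ha2).mpr hpa⟩
  · rw [if_neg hc]
    simp only [Bool.false_eq_true, false_iff]
    rintro ⟨⟨a, b, hpa, hpb, ha0, hb0, hn⟩, h11⟩
    have ha2 := two_le_of_prime hpa ha0
    have hb2 := two_le_of_prime hpb hb0
    apply hc
    refine ⟨by nlinarith, fun hm => h11 ((PySem.Int.mod_eq_zero_iff_dvd num 11).mp hm)⟩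

lemma cond_eq (num : Int) : innerA num = innerB num := by
  have h := (innerA_iff num).trans (innerB_iff num).symm
  cases hA : innerA num <;> cases hB : innerB num <;> simp [hA, hB] at h ⊢

-- ===== VERDICT (by name: the statement is the Claim_ definition above) =====
theorem find_product_of_two_primes_not_divisible_by_11_spec : Claim_equal_find_product_of_two_primes_not_divisible_by_11 := by
  intro lst _
  unfold Spec_find_product_of_two_primes_not_divisible_by_11
  unfold find_product_of_two_primes_not_divisible_by_11 find_product_of_two_primes_not_divisible_by_11_alt
  simp only [cond_eq]
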